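-- pv_equiv track=rewrite | github.com/Piotr45/adventofcode-2023 | 2023/day-23/walk.py | bfs
-- ===== SOURCE A (Python) =====
-- from collections import deque
--
-- DIRECTION_MAP = {"v": (1, 0), "^": (-1, 0), ">": (0, 1), "<": (0, -1)}
--
-- def get_neighbors(hiking_map: dict, position: tuple, part2: bool = False):
--     if not part2:
--         if hiking_map[position] in DIRECTION_MAP.keys():
--             yield position[0] + DIRECTION_MAP[hiking_map[position]][0], position[
--                 1
--             ] + DIRECTION_MAP[hiking_map[position]][1]
--             return
--
--     for direction in ((0, -1), (1, 0), (-1, 0), (0, 1)):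
--         new_position = position[0] + direction[0], position[1] + direction[1]
--         if new_position not in hiking_map or hiking_map[new_position] == "#":
--             continue
--
--         yield new_position
--
-- def bfs(hiking_map: dict, start: tuple, end: tuple, crossings: list):
--     to_visit = deque([start])
--     length = dict()
--     length[start] = 0
--
--     while to_visit:
--         column_index, row_index = to_visit.pop()
--
--         if (column_index, row_index) == end:
--             return length[end]
--         if (column_index, row_index) != start and (
--             column_index,
--             row_index,
--         ) in crossings:
--             continue
--
--         for new_position in get_neighbors(hiking_map, (column_index, row_index), True):
--             new_length = length[column_index, row_index] + 1
--
--             if new_position not in length or new_length < length[new_position]: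
--                 length[new_position] = new_length
--                 to_visit.appendleft(new_position)
-- ===== SOURCE B (Python) =====
-- def bfs(hiking_map: dict, start: tuple, end: tuple, crossings: list):
--     frontier = [start]
--     visited = {start}
--     depth = 0
--     while frontier:
--         next_frontier = []
--         for position in frontier:
--             if position == end:
--                 return depth
--             if position != start and position in crossings:
--                 continue
--             column, row = position
--             for direction in ((0, -1), (1, 0), (-1, 0), (0, 1)):
--                 neighbor = (column + direction[0], row + direction[1])
--                 if (
--                     neighbor in hiking_map
--                     and hiking_map[neighbor] != "#"
--                     and neighbor not in visited
--                 ):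
--                     visited.add(neighbor)
--                     next_frontier.append(neighbor)
--         frontier = next_frontier
--         depth += 1
--     return None
-- ===== Notes on version B (the rewrite author's own statement) =====
-- stated objective: idiomatic
-- what changed: A's deque with pop/appendleft and a distance dictionary relaxed on every edge is replaced by a level-synchronous BFS: a frontier list expanded level by level with a visited set and a single depth counter, no per-node distance bookkeeping.
import Mathlib
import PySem

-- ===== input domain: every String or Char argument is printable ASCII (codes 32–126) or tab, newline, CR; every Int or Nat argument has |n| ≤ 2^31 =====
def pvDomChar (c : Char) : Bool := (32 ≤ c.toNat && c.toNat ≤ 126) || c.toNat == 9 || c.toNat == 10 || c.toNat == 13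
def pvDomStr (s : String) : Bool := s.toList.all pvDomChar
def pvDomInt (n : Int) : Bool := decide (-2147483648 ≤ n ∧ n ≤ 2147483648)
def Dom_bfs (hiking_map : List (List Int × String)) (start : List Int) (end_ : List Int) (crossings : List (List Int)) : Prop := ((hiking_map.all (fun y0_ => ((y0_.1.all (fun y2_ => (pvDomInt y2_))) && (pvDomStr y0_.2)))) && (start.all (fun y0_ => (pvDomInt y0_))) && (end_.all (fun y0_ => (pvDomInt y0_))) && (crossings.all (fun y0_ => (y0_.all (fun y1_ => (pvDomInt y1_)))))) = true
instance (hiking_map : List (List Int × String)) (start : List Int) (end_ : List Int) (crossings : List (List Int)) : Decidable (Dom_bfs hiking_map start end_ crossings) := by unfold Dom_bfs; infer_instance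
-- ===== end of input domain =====

-- B replaces A's deque + distance-dict relaxation by a level-synchronous BFS with a visited set
-- and a depth counter (objective: idiomatic); equivalence is about the return value only.

-- ===== PORT A =====
-- DIRECTION_MAP is only consulted when part2 = False; bfs calls get_neighbors with part2 = True,
-- so only the four-direction loop below is ever reached.
def pvDirections : List (Int × Int) := [(0, -1), (1, 0), (-1, 0), (0, 1)]

-- get_neighbors(hiking_map, (c, r), True): the generator's yields, in order
def bfsGetNeighbors (m : PySem.Dict (List Int) String) (c r : Int) : List (List Int) :=
  pvDirections.filterMap (fun d =>
    match m.get? [c + d.1, r + d.2] with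
    | none => none                                   -- new_position not in hiking_map: continue
    | some s => if s == "#" then none else some [c + d.1, r + d.2])

-- the while loop; the deque is represented REVERSED: Python's .pop() (right end) = head,
-- .appendleft = append at the right; fuel only guards termination (Python's loop terminates).
def bfsLoopA (m : PySem.Dict (List Int) String) (start end_ : List Int)
    (crossings : List (List Int)) :
    PySem.Dict (List Int) Int → List (List Int) → Nat → Option Int
  | _, _, 0 => none
  | _, [], _ + 1 => none                             -- while to_visit falls through: return None
  | len, p :: rest, f + 1 =>
    match p with
    | [c, r] =>                                      -- column_index, row_index = to_visit.pop()
      if [c, r] == end_ then some (len.getD end_ 0)  -- return length[end] (key present: end was enqueued)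
      else if [c, r] != start && crossings.contains [c, r] then
        bfsLoopA m start end_ crossings len rest f
      else
        let st := (bfsGetNeighbors m c r).foldl
          (fun (st : PySem.Dict (List Int) Int × List (List Int)) np =>
            let nl := st.1.getD [c, r] 0 + 1         -- new_length = length[(c, r)] + 1 (key present)
            if !st.1.contains np || nl < st.1.getD np 0 then
              (st.1.insert np nl, st.2 ++ [np])
            else st) (len, rest)
        bfsLoopA m start end_ crossings st.1 st.2 f
    | _ => none                                      -- ValueError on tuple unpacking; outside Pre_

def bfs (hiking_map : List (List Int × String)) (start : List Int) (end_ : List Int) (crossings : List (List Int)) : Option Int :=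
  bfsLoopA (PySem.Dict.mk hiking_map) start end_ crossings
    ((PySem.Dict.empty).insert start 0) [start]
    ((hiking_map.length + 2) * (hiking_map.length + 2))

-- ===== PORT B =====
-- level-synchronous BFS: frontier processed element by element (one fuel tick per element, the
-- level switch is folded into the step that reaches the end of the frontier); fuel = same guard.
def bfsLoopB (m : PySem.Dict (List Int) String) (start end_ : List Int)
    (crossings : List (List Int)) :
    Nat → Int → List (List Int) → List (List Int) → PySem.Set (List Int) → Option Int
  | 0, _, _, _, _ => none
  | _ + 1, _, [], _, _ => none                       -- while frontier falls through: return None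
  | f + 1, depth, p :: cur, next, vis =>
    if p == end_ then some depth
    else if p != start && crossings.contains p then
      match cur with
      | [] => bfsLoopB m start end_ crossings f (depth + 1) next [] vis
      | _ :: _ => bfsLoopB m start end_ crossings f depth cur next vis
    else
      match p with
      | [c, r] =>                                    -- column, row = position
        let st := pvDirections.foldl
          (fun (st : List (List Int) × PySem.Set (List Int)) d =>
            let np := [c + d.1, r + d.2]
            if (match m.get? np with | some s => s != "#" | none => false)
                && !st.2.contains np then
              (st.1 ++ [np], st.2.add np)
            else st) (next, vis)
        match cur with
        | [] => bfsLoopB m start end_ crossings f (depth + 1) st.1 [] st.2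
        | _ :: _ => bfsLoopB m start end_ crossings f depth cur st.1 st.2
      | _ => none                                    -- ValueError on tuple unpacking; outside Pre_

def bfs_alt (hiking_map : List (List Int × String)) (start : List Int) (end_ : List Int) (crossings : List (List Int)) : Option Int :=
  bfsLoopB (PySem.Dict.mk hiking_map) start end_ crossings
    ((hiking_map.length + 2) * (hiking_map.length + 2)) 0 [start] [] (PySem.Set.ofList [start])

-- ===== PRECONDITION & SPEC =====
-- Pre_ excludes exactly the inputs on which A raises: a start that is not a pair makes
-- 'column_index, row_index = to_visit.pop()' raise ValueError on the very first iteration.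
def Pre_bfs (hiking_map : List (List Int × String)) (start : List Int) (end_ : List Int) (crossings : List (List Int)) : Prop :=
  start.length = 2
instance (hiking_map : List (List Int × String)) (start : List Int) (end_ : List Int) (crossings : List (List Int)) : Decidable (Pre_bfs hiking_map start end_ crossings) := by unfold Pre_bfs; infer_instance

def pvWitness_bfs : (List (List Int × String)) × List Int × List Int × List (List Int) :=
  ([([0, 0], "."), ([0, 1], ".")], [0, 0], [0, 1], [])

def Spec_bfs (hiking_map : List (List Int × String)) (start : List Int) (end_ : List Int) (crossings : List (List Int)) (out : Option Int) : Prop := out = bfs_alt hiking_map start end_ crossings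
instance (hiking_map : List (List Int × String)) (start : List Int) (end_ : List Int) (crossings : List (List Int)) (out : Option Int) : Decidable (Spec_bfs hiking_map start end_ crossings out) := by unfold Spec_bfs; infer_instance

-- ===== CLAIM (what is proved, stated in full; the proofs are below) =====
def Claim_equal_bfs : Prop := ∀ (hiking_map : List (List Int × String)) (start : List Int) (end_ : List Int) (crossings : List (List Int)), Dom_bfs hiking_map start end_ crossings → Pre_bfs hiking_map start end_ crossings → Spec_bfs hiking_map start end_ crossings (bfs hiking_map start end_ crossings)

-- ===== LEMMAS AND PROOFS =====

-- A's neighbour fold, lifted over the direction list (List.foldl_filterMap shape)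
def pvFA (m : PySem.Dict (List Int) String) (c r : Int)
    (st : PySem.Dict (List Int) Int × List (List Int)) (d : Int × Int) :
    PySem.Dict (List Int) Int × List (List Int) :=
  match (match m.get? [c + d.1, r + d.2] with
         | none => none
         | some s => if s == "#" then none else some [c + d.1, r + d.2]) with
  | some np =>
    let nl := st.1.getD [c, r] 0 + 1
    if !st.1.contains np || nl < st.1.getD np 0 then
      (st.1.insert np nl, st.2 ++ [np])
    else st
  | none => st

-- B's neighbour fold function
def pvFB (m : PySem.Dict (List Int) String) (c r : Int)
    (st : List (List Int) × PySem.Set (List Int)) (d : Int × Int) :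
    List (List Int) × PySem.Set (List Int) :=
  let np := [c + d.1, r + d.2]
  if (match m.get? np with | some s => s != "#" | none => false) && !st.2.contains np then
    (st.1 ++ [np], st.2.add np)
  else st

lemma pvFoldA_eq (m : PySem.Dict (List Int) String) (c r : Int)
    (init : PySem.Dict (List Int) Int × List (List Int)) :
    (bfsGetNeighbors m c r).foldl
      (fun (st : PySem.Dict (List Int) Int × List (List Int)) np =>
        let nl := st.1.getD [c, r] 0 + 1
        if !st.1.contains np || nl < st.1.getD np 0 then
          (st.1.insert np nl, st.2 ++ [np])
        else st) init
      = pvDirections.foldl (pvFA m c r) init := by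
  simp only [bfsGetNeighbors, List.foldl_filterMap]
  congr 1
  funext st d
  simp only [pvFA]
  cases m.get? [c + d.1, r + d.2] with
  | none => rfl
  | some s => cases hs : s == "#" <;> simp [hs]

lemma pv_expand_sim (m : PySem.Dict (List Int) String) (c r depth : Int)
    (ds : List (Int × Int)) :
    ∀ (len : PySem.Dict (List Int) Int) (q next : List (List Int))
      (vis : PySem.Set (List Int)),
    (∀ x : List Int, vis.contains x = len.contains x) →
    len.get? [c, r] = some depth →
    (∀ x v, len.get? x = some v → v ≤ depth + 1) →
    ∃ (len' : PySem.Dict (List Int) Int) (vis' : PySem.Set (List Int))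
      (t : List (List Int)),
      ds.foldl (pvFA m c r) (len, q) = (len', q ++ t) ∧
      ds.foldl (pvFB m c r) (next, vis) = (next ++ t, vis') ∧
      (∀ x : List Int, vis'.contains x = len'.contains x) ∧
      (∀ x : List Int, len.contains x = true → len'.get? x = len.get? x) ∧
      (∀ x ∈ t, len'.get? x = some (depth + 1) ∧ x.length = 2) ∧
      (∀ x v, len'.get? x = some v → v ≤ depth + 1) := by
  induction ds with
  | nil =>
    intro len q next vis hv hp hb
    exact ⟨len, vis, [], by simp, by simp, hv, fun x _ => rfl, by simp, hb⟩
  | cons d ds ih =>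
    intro len q next vis hv hp hb
    simp only [List.foldl_cons]
    rcases hm : m.get? [c + d.1, r + d.2] with _ | s
    · have hstepA : pvFA m c r (len, q) d = (len, q) := by simp [pvFA, hm]
      have hstepB : pvFB m c r (next, vis) d = (next, vis) := by simp [pvFB, hm]
      rw [hstepA, hstepB]; exact ih len q next vis hv hp hb
    · cases hs : s == "#" with
    | true =>
      have hs' : s = "#" := eq_of_beq hs
      have hstepA : pvFA m c r (len, q) d = (len, q) := by simp [pvFA, hm, hs']
      have hstepB : pvFB m c r (next, vis) d = (next, vis) := by simp [pvFB, hm, hs']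
      rw [hstepA, hstepB]; exact ih len q next vis hv hp hb
    | false =>
      have hs' : ¬ s = "#" := by intro h; subst h; simp at hs
      have hgetd : len.getD [c, r] 0 = depth := by
        rw [PySem.Dict.getD_eq_get?_getD, hp]; rfl
      cases hc : len.contains [c + d.1, r + d.2] with
      | true =>
        have hsome : (len.get? [c + d.1, r + d.2]).isSome = true := by
          rw [← PySem.Dict.contains_eq_isSome_get?]; exact hc
        obtain ⟨v, hvv⟩ := Option.isSome_iff_exists.mp hsome
        have hvd : len.getD [c + d.1, r + d.2] 0 = v := by
          rw [PySem.Dict.getD_eq_get?_getD, hvv]; rfl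
        have hnl : ¬ (depth + 1 < v) := not_lt.mpr (hb _ _ hvv)
        have hmemvis : [c + d.1, r + d.2] ∈ vis := by
          rw [← PySem.Set.contains_iff, hv]; exact hc
        have hstepA : pvFA m c r (len, q) d = (len, q) := by
          simp [pvFA, hm, hs', hc, hgetd, hvd, hnl]
        have hstepB : pvFB m c r (next, vis) d = (next, vis) := by
          simp [pvFB, hm, hmemvis]
        rw [hstepA, hstepB]; exact ih len q next vis hv hp hb
      | false =>
        have hcontain_iff : ∀ (dd : PySem.Dict (List Int) Int) (x : List Int),
            dd.contains x = (dd.get? x).isSome := fun dd x =>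
          PySem.Dict.contains_eq_isSome_get? dd x
        have hnvis : [c + d.1, r + d.2] ∉ vis := by
          intro hmem
          have := (PySem.Set.contains_iff vis _).mpr hmem
          rw [hv, hc] at this; cases this
        have hcrc : len.contains [c, r] = true := by
          rw [hcontain_iff, hp]; rfl
        have hcr_ne : ([c, r] : List Int) ≠ [c + d.1, r + d.2] := by
          intro h; rw [h, hc] at hcrc; cases hcrc
        have hstepA : pvFA m c r (len, q) d
            = (len.insert [c + d.1, r + d.2] (depth + 1), q ++ [[c + d.1, r + d.2]]) := by
          simp [pvFA, hm, hs', hc, hgetd]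
        have hstepB : pvFB m c r (next, vis) d
            = (next ++ [[c + d.1, r + d.2]], vis.add [c + d.1, r + d.2]) := by
          simp [pvFB, hm, hs', hnvis]
        rw [hstepA, hstepB]
        have hv' : ∀ x : List Int,
            (vis.add [c + d.1, r + d.2]).contains x
              = (len.insert [c + d.1, r + d.2] (depth + 1)).contains x := by
          intro x
          by_cases hx : x = [c + d.1, r + d.2]
          · rw [hx]
            have h1 : (vis.add [c + d.1, r + d.2]).contains [c + d.1, r + d.2] = true := by
              rw [PySem.Set.contains_iff]; exact (PySem.Set.mem_add _ _ _).mpr (Or.inr rfl)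
            rw [h1, hcontain_iff, PySem.Dict.get?_insert_self]; rfl
          · have h1 : (vis.add [c + d.1, r + d.2]).contains x = vis.contains x := by
              by_cases hxv : x ∈ vis <;>
                simp [PySem.Set.contains_iff, PySem.Set.mem_add, hx, hxv]
            rw [h1, hv, hcontain_iff, hcontain_iff,
              PySem.Dict.get?_insert_of_ne _ _ hx]
        have hp' : (len.insert [c + d.1, r + d.2] (depth + 1)).get? [c, r]
            = some depth := by
          rw [PySem.Dict.get?_insert_of_ne _ _ hcr_ne]; exact hp
        have hb' : ∀ x v, (len.insert [c + d.1, r + d.2] (depth + 1)).get? x = some v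
            → v ≤ depth + 1 := by
          intro x v hxv
          by_cases hx : x = [c + d.1, r + d.2]
          · rw [hx, PySem.Dict.get?_insert_self] at hxv
            cases hxv; exact le_refl _
          · rw [PySem.Dict.get?_insert_of_ne _ _ hx] at hxv; exact hb _ _ hxv
        obtain ⟨len', vis', t, hA, hB, hv2, hpres, ht, hb2⟩ :=
          ih (len.insert [c + d.1, r + d.2] (depth + 1)) (q ++ [[c + d.1, r + d.2]])
            (next ++ [[c + d.1, r + d.2]]) (vis.add [c + d.1, r + d.2]) hv' hp' hb'
        refine ⟨len', vis', [c + d.1, r + d.2] :: t, ?_, ?_, hv2, ?_, ?_, hb2⟩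
        · rw [hA]; simp
        · rw [hB]; simp
        · intro x hx
          have hxne : x ≠ [c + d.1, r + d.2] := by
            intro h; rw [h, hc] at hx; cases hx
          have hcx : (len.insert [c + d.1, r + d.2] (depth + 1)).contains x = true := by
            rw [hcontain_iff, PySem.Dict.get?_insert_of_ne _ _ hxne, ← hcontain_iff]
            exact hx
          rw [hpres x hcx, PySem.Dict.get?_insert_of_ne _ _ hxne]
        · intro x hx
          rcases List.mem_cons.mp hx with hx | hx
          · have hcx : (len.insert [c + d.1, r + d.2] (depth + 1)).contains x = true := by
              rw [hx, hcontain_iff, PySem.Dict.get?_insert_self]; rfl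
            refine ⟨?_, by rw [hx]; rfl⟩
            rw [hpres _ hcx, hx, PySem.Dict.get?_insert_self]
          · exact ht x hx

lemma pv_loop_sim (m : PySem.Dict (List Int) String) (start end_ : List Int)
    (crossings : List (List Int)) :
    ∀ (f : Nat) (depth : Int) (cur next : List (List Int))
      (len : PySem.Dict (List Int) Int) (vis : PySem.Set (List Int)),
    (∀ x : List Int, vis.contains x = len.contains x) →
    (∀ p ∈ cur, len.get? p = some depth) →
    (∀ p ∈ next, len.get? p = some (depth + 1)) →
    (∀ x v, len.get? x = some v → v ≤ depth + 1) →
    (∀ p ∈ cur, p.length = 2) →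
    (∀ p ∈ next, p.length = 2) →
    (cur = [] → next = []) →
    bfsLoopA m start end_ crossings len (cur ++ next) f
      = bfsLoopB m start end_ crossings f depth cur next vis := by
  intro f
  induction f with
  | zero => intro depth cur next len vis _ _ _ _ _ _ _; rfl
  | succ f ihf =>
    intro depth cur next len vis hv hcur hnext hb hl2c hl2n hnorm
    cases cur with
    | nil =>
      rw [hnorm rfl]; rfl
    | cons p cur' =>
      obtain ⟨cc, rr, hp⟩ : ∃ c2 r2 : Int, p = [c2, r2] := by
        have h2 := hl2c p List.mem_cons_self
        match p, h2 with
        | [c2, r2], _ => exact ⟨c2, r2, rfl⟩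
      subst hp
      show bfsLoopA m start end_ crossings len ([cc, rr] :: (cur' ++ next)) (f + 1) = _
      simp only [bfsLoopA, bfsLoopB]
      cases hend : (([cc, rr] : List Int) == end_) with
      | true =>
        have heq : ([cc, rr] : List Int) = end_ := eq_of_beq hend
        have hgd : len.getD end_ 0 = depth := by
          rw [PySem.Dict.getD_eq_get?_getD, ← heq, hcur _ List.mem_cons_self]; rfl
        simp [hgd]
      | false =>
        simp only [Bool.false_eq_true, if_false]
        cases hcross : ((([cc, rr] : List Int) != start) && crossings.contains [cc, rr]) with
        | true =>
          simp only [if_true]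
          cases cur' with
          | nil =>
            have := ihf (depth + 1) next [] len vis hv
              (fun p hp => hnext p hp) (by simp)
              (fun x v hxv => le_trans (hb x v hxv) (by omega))
              hl2n (by simp) (fun _ => rfl)
            simpa using this
          | cons a cur'' =>
            exact ihf depth (a :: cur'') next len vis hv
              (fun p hp => hcur p (List.mem_cons_of_mem _ hp))
              hnext hb
              (fun p hp => hl2c p (List.mem_cons_of_mem _ hp))
              hl2n (by intro h; cases h)
        | false =>
          simp only [Bool.false_eq_true, if_false]
          obtain ⟨len', vis', t, hA, hB, hv2, hpres, ht, hb2⟩ :=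
            pv_expand_sim m cc rr depth pvDirections len (cur' ++ next) next vis hv
              (hcur _ List.mem_cons_self) hb
          have hfb : (fun (st : List (List Int) × PySem.Set (List Int)) (d : Int × Int) =>
              if (match m.get? [cc + d.1, rr + d.2] with
                  | some s => s != "#"
                  | none => false) && !st.2.contains [cc + d.1, rr + d.2] then
                (st.1 ++ [[cc + d.1, rr + d.2]], st.2.add [cc + d.1, rr + d.2])
              else st) = pvFB m cc rr := rfl
          rw [pvFoldA_eq, hA, hfb, hB]
          have hkeep : ∀ p, len.get? p = some depth → len'.get? p = some depth := by
            intro p hpd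
            rw [hpres p (by rw [PySem.Dict.contains_eq_isSome_get?, hpd]; rfl)]
            exact hpd
          have hkeep1 : ∀ p, len.get? p = some (depth + 1)
              → len'.get? p = some (depth + 1) := by
            intro p hpd
            rw [hpres p (by rw [PySem.Dict.contains_eq_isSome_get?, hpd]; rfl)]
            exact hpd
          have hnext' : ∀ p ∈ next ++ t, len'.get? p = some (depth + 1) := by
            intro p hp
            rcases List.mem_append.mp hp with hp | hp
            · exact hkeep1 p (hnext p hp)
            · exact (ht p hp).1
          have hl2nt : ∀ p ∈ next ++ t, p.length = 2 := by
            intro p hp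
            rcases List.mem_append.mp hp with hp | hp
            · exact hl2n p hp
            · exact (ht p hp).2
          cases cur' with
          | nil =>
            have := ihf (depth + 1) (next ++ t) [] len' vis' hv2 hnext' (by simp)
              (fun x v hxv => le_trans (hb2 x v hxv) (by omega))
              hl2nt (by simp) (fun _ => rfl)
            simpa using this
          | cons a cur'' =>
            have := ihf depth (a :: cur'') (next ++ t) len' vis' hv2
              (fun p hp => hkeep p (hcur p (List.mem_cons_of_mem _ hp)))
              hnext' hb2
              (fun p hp => hl2c p (List.mem_cons_of_mem _ hp))
              hl2nt (by intro h; cases h)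
            simpa using this

-- ===== VERDICT (by name: the statement is the Claim_ definition above) =====
theorem bfs_spec : Claim_equal_bfs := by
  intro hiking_map start end_ crossings _ hpre
  unfold Spec_bfs bfs bfs_alt
  have hv : ∀ x : List Int, (PySem.Set.ofList [start]).contains x
      = ((PySem.Dict.empty).insert start 0).contains x := by
    intro x
    by_cases hx : x = start
    · rw [hx]
      have h1 : (PySem.Set.ofList [start]).contains start = true := by
        rw [PySem.Set.contains_iff, PySem.Set.mem_ofList]; exact List.mem_cons_self
      rw [h1, PySem.Dict.contains_eq_isSome_get?, PySem.Dict.get?_insert_self]; rfl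
    · have h1 : (PySem.Set.ofList [start]).contains x = false := by
        rw [← Bool.not_eq_true, PySem.Set.contains_iff, PySem.Set.mem_ofList]
        simp [hx]
      rw [h1, PySem.Dict.contains_eq_isSome_get?,
        PySem.Dict.get?_insert_of_ne _ _ hx]
      rfl
  have hb : ∀ (x : List Int) (v : Int),
      ((PySem.Dict.empty).insert start 0).get? x = some v → v ≤ 0 + 1 := by
    intro x v hxv
    by_cases hx : x = start
    · rw [hx, PySem.Dict.get?_insert_self] at hxv; cases hxv; omega
    · rw [PySem.Dict.get?_insert_of_ne _ _ hx] at hxv; cases hxv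
  have := pv_loop_sim (PySem.Dict.mk hiking_map) start end_ crossings
    ((hiking_map.length + 2) * (hiking_map.length + 2)) 0 [start] []
    ((PySem.Dict.empty).insert start 0) (PySem.Set.ofList [start])
    hv
    (by intro p hp
        rcases List.mem_singleton.mp hp with rfl
        exact PySem.Dict.get?_insert_self _ _ _)
    (by intro p hp; cases hp)
    hb
    (by intro p hp
        rcases List.mem_singleton.mp hp with rfl
        exact hpre)
    (by intro p hp; cases hp)
    (by intro h; cases h)
  simpa using this
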